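-- pv_equiv track=rewrite | github.com/ICICLE-ai/Camera_Trap | src/training/accumulative.py | calculate_round_class_distribution
-- ===== SOURCE A (Python) =====
-- def calculate_round_class_distribution(train_data, test_data, checkpoint_round, current_train_checkpoint, current_test_checkpoint):
--     """Calculate per-class distribution for a specific accumulative round."""
--     round_class_distribution = {}
--
--     # Calculate training samples (cumulative from ckp_1 to current_train_checkpoint)
--     for ckp_num in range(1, checkpoint_round + 1):
--         ckp_key = f'ckp_{ckp_num}'
--         if ckp_key in train_data:
--             for sample in train_data[ckp_key]:
--                 class_name = sample['common']
--                 if class_name not in round_class_distribution: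
--                     round_class_distribution[class_name] = {'train': 0, 'val': 0, 'test': 0}
--                 round_class_distribution[class_name]['train'] += 1
--
--     # Calculate validation samples (from current_train_checkpoint test data)
--     if current_train_checkpoint in test_data:
--         for sample in test_data[current_train_checkpoint]:
--             class_name = sample['common']
--             if class_name not in round_class_distribution:
--                 round_class_distribution[class_name] = {'train': 0, 'val': 0, 'test': 0}
--             round_class_distribution[class_name]['val'] += 1
--
--     # Calculate test samples (from current_test_checkpoint test data)
--     if current_test_checkpoint in test_data:
--         for sample in test_data[current_test_checkpoint]:
--             class_name = sample['common']
--             if class_name not in round_class_distribution: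
--                 round_class_distribution[class_name] = {'train': 0, 'val': 0, 'test': 0}
--             round_class_distribution[class_name]['test'] += 1
--
--     return round_class_distribution
-- ===== SOURCE B (Python) =====
-- def calculate_round_class_distribution(train_data, test_data, checkpoint_round, current_train_checkpoint, current_test_checkpoint):
--     """Calculate per-class distribution for a specific accumulative round.
--
--     Tabulate-then-merge: three independent frequency maps (train/val/test),
--     then one final pass over the union of their keys assembles the result."""
--     def tally(samples):
--         counts = {}
--         for sample in samples:
--             name = sample['common']
--             counts[name] = counts.get(name, 0) + 1
--         return counts
--
--     train_samples = []
--     for ckp_num in range(1, checkpoint_round + 1):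
--         train_samples.extend(train_data.get(f'ckp_{ckp_num}', []))
--     train_counts = tally(train_samples)
--     val_counts = tally(test_data.get(current_train_checkpoint, []))
--     test_counts = tally(test_data.get(current_test_checkpoint, []))
--
--     result = {}
--     for name in list(train_counts) + list(val_counts) + list(test_counts):
--         if name not in result:
--             result[name] = {'train': train_counts.get(name, 0),
--                             'val': val_counts.get(name, 0),
--                             'test': test_counts.get(name, 0)}
--     return result
-- ===== Notes on version B (the rewrite author's own statement) =====
-- stated objective: simpler
-- what changed: A interleaves three passes that grow and mutate one shared nested dict per sample; B tabulates three independent per-split frequency maps (train/val/test) and then assembles the result in one final merge pass over the union of their keys.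
import Mathlib
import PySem

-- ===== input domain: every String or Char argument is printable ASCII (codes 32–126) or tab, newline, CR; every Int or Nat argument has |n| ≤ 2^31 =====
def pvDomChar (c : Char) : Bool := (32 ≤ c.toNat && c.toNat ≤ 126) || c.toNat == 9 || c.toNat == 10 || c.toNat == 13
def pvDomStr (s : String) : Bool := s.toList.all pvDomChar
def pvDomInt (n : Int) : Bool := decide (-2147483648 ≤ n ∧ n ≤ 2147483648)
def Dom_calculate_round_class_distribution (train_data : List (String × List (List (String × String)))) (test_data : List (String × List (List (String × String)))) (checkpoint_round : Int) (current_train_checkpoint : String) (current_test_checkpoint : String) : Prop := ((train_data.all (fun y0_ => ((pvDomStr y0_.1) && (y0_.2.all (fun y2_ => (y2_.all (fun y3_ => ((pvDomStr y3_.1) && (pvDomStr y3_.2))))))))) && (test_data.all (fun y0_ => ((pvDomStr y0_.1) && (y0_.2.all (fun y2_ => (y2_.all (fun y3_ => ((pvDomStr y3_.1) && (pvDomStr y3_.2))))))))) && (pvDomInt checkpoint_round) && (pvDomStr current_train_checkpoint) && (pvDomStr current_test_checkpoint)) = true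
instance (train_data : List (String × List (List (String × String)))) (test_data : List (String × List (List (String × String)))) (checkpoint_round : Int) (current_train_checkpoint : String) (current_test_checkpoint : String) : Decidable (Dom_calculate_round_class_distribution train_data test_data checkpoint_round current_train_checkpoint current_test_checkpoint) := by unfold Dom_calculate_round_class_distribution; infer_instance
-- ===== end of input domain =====

-- B rebuilds the same per-class train/val/test table by tabulate-then-merge: three independent
-- frequency maps, then one pass over the union of their keys (objective: simpler decomposition;
-- same asymptotic cost). Return-value equivalence only; neither version mutates its arguments.

-- ===== PORT A =====
-- one sample-processing step of A's loops; `field` is "train"/"val"/"test".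
-- (a sample without a "common" key makes Python raise KeyError: `none` here, excluded by Pre_)
def pvStepA (field : String) (d : PySem.Dict String (PySem.Dict String Int)) (sample : List (String × String)) : PySem.Dict String (PySem.Dict String Int) :=
  match (PySem.Dict.ofList sample).get? "common" with
  | none => d
  | some class_name =>
    let d' := if d.contains class_name then d
              else d.insert class_name (PySem.Dict.ofList [("train", (0:Int)), ("val", 0), ("test", 0)])
    d'.modify class_name PySem.Dict.empty (fun inner => inner.insert field (inner.getD field 0 + 1))

def calculate_round_class_distribution (train_data : List (String × List (List (String × String)))) (test_data : List (String × List (List (String × String)))) (checkpoint_round : Int) (current_train_checkpoint : String) (current_test_checkpoint : String) : List (String × List (String × Int)) :=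
  let tr := PySem.Dict.ofList train_data
  let te := PySem.Dict.ofList test_data
  let d0 : PySem.Dict String (PySem.Dict String Int) := PySem.Dict.empty
  let d1 := (PySem.List.pyRange 1 (checkpoint_round + 1) 1).foldl (fun d ckp_num =>
      match tr.get? ("ckp_" ++ PySem.Int.toStr ckp_num) with
      | none => d
      | some samples => samples.foldl (pvStepA "train") d) d0
  let d2 := match te.get? current_train_checkpoint with
      | none => d1
      | some samples => samples.foldl (pvStepA "val") d1
  let d3 := match te.get? current_test_checkpoint with
      | none => d2
      | some samples => samples.foldl (pvStepA "test") d2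
  d3.items.map (fun p => (p.1, p.2.items))

-- ===== PORT B =====
-- Source B's `tally`: one frequency map over one stream of samples
def pvTally (samples : List (List (String × String))) : PySem.Dict String Int :=
  samples.foldl (fun counts sample =>
    match (PySem.Dict.ofList sample).get? "common" with
    | none => counts
    | some name => counts.insert name (counts.getD name 0 + 1)) PySem.Dict.empty

def calculate_round_class_distribution_alt (train_data : List (String × List (List (String × String)))) (test_data : List (String × List (List (String × String)))) (checkpoint_round : Int) (current_train_checkpoint : String) (current_test_checkpoint : String) : List (String × List (String × Int)) :=
  let tr := PySem.Dict.ofList train_data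
  let te := PySem.Dict.ofList test_data
  let train_samples := (PySem.List.pyRange 1 (checkpoint_round + 1) 1).foldl
      (fun acc ckp_num => acc ++ tr.getD ("ckp_" ++ PySem.Int.toStr ckp_num) []) []
  let train_counts := pvTally train_samples
  let val_counts := pvTally (te.getD current_train_checkpoint [])
  let test_counts := pvTally (te.getD current_test_checkpoint [])
  let result := (train_counts.keys ++ val_counts.keys ++ test_counts.keys).foldl
      (fun r name => if r.contains name then r
        else r.insert name (PySem.Dict.ofList
          [("train", train_counts.getD name 0), ("val", val_counts.getD name 0), ("test", test_counts.getD name 0)]))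
      PySem.Dict.empty
  result.items.map (fun p => (p.1, p.2.items))

-- ===== PRECONDITION & SPEC =====
-- Pre_ excludes exactly the inputs on which the Python A raises KeyError: a sample without a
-- "common" key inside one of the checkpoint lists the function actually reads (a train_data key
-- "ckp_<i>" with 1 ≤ i ≤ checkpoint_round — recognised by parsing the key, so the condition is
-- checkable in time proportional to the input, not to checkpoint_round — or the test_data lists
-- at the two current checkpoints).
def Pre_calculate_round_class_distribution (train_data : List (String × List (List (String × String)))) (test_data : List (String × List (List (String × String)))) (checkpoint_round : Int) (current_train_checkpoint : String) (current_test_checkpoint : String) : Prop :=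
  (∀ p ∈ train_data,
     ∀ i ∈ (PySem.Int.ofStr? (String.mk (p.1.toList.drop 4))).toList,
       p.1 = "ckp_" ++ PySem.Int.toStr i → 1 ≤ i → i ≤ checkpoint_round →
         ∀ sample ∈ (PySem.Dict.ofList train_data).getD p.1 [],
           (PySem.Dict.ofList sample).contains "common" = true) ∧
  (∀ sample ∈ (PySem.Dict.ofList test_data).getD current_train_checkpoint [],
     (PySem.Dict.ofList sample).contains "common" = true) ∧
  (∀ sample ∈ (PySem.Dict.ofList test_data).getD current_test_checkpoint [],
     (PySem.Dict.ofList sample).contains "common" = true)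
instance (train_data : List (String × List (List (String × String)))) (test_data : List (String × List (List (String × String)))) (checkpoint_round : Int) (current_train_checkpoint : String) (current_test_checkpoint : String) : Decidable (Pre_calculate_round_class_distribution train_data test_data checkpoint_round current_train_checkpoint current_test_checkpoint) := by unfold Pre_calculate_round_class_distribution; infer_instance

def pvWitness_calculate_round_class_distribution : (List (String × List (List (String × String)))) × (List (String × List (List (String × String)))) × Int × String × String :=
  ([("ckp_1", [[("common", "cat")], [("common", "dog")]])],
   [("t0", [[("common", "cat")]])],
   1, "t0", "t0")

def Spec_calculate_round_class_distribution (train_data : List (String × List (List (String × String)))) (test_data : List (String × List (List (String × String)))) (checkpoint_round : Int) (current_train_checkpoint : String) (current_test_checkpoint : String) (out : List (String × List (String × Int))) : Prop := out = calculate_round_class_distribution_alt train_data test_data checkpoint_round current_train_checkpoint current_test_checkpoint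
instance (train_data : List (String × List (List (String × String)))) (test_data : List (String × List (List (String × String)))) (checkpoint_round : Int) (current_train_checkpoint : String) (current_test_checkpoint : String) (out : List (String × List (String × Int))) : Decidable (Spec_calculate_round_class_distribution train_data test_data checkpoint_round current_train_checkpoint current_test_checkpoint out) := by unfold Spec_calculate_round_class_distribution; infer_instance

-- ===== CLAIM (what is proved, stated in full; the proofs are below) =====
def Claim_equal_calculate_round_class_distribution : Prop := ∀ (train_data : List (String × List (List (String × String)))) (test_data : List (String × List (List (String × String)))) (checkpoint_round : Int) (current_train_checkpoint : String) (current_test_checkpoint : String), Dom_calculate_round_class_distribution train_data test_data checkpoint_round current_train_checkpoint current_test_checkpoint → Pre_calculate_round_class_distribution train_data test_data checkpoint_round current_train_checkpoint current_test_checkpoint → Spec_calculate_round_class_distribution train_data test_data checkpoint_round current_train_checkpoint current_test_checkpoint (calculate_round_class_distribution train_data test_data checkpoint_round current_train_checkpoint current_test_checkpoint)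

-- ===== LEMMAS AND PROOFS =====

-- the class name of a sample, and the class-name stream of a sample list
def pvName (sample : List (String × String)) : Option String := (PySem.Dict.ofList sample).get? "common"
def pvNames (l : List (List (String × String))) : List String := l.filterMap pvName

-- the train name stream and the name stream of one test-data checkpoint
def pvT (train_data : List (String × List (List (String × String)))) (checkpoint_round : Int) : List String :=
  pvNames ((PySem.List.pyRange 1 (checkpoint_round + 1) 1).flatMap
    (fun ckp_num => (PySem.Dict.ofList train_data).getD ("ckp_" ++ PySem.Int.toStr ckp_num) []))
def pvV (test_data : List (String × List (List (String × String)))) (k : String) : List String :=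
  pvNames ((PySem.Dict.ofList test_data).getD k [])

-- canonical form shared by both sides: keys S (in order), per-key triple of running counts
def pvTriple (a b c : Int) : PySem.Dict String Int := PySem.Dict.mk [("train", a), ("val", b), ("test", c)]
def pvCanon (S : List String) (ta va xa : String → Int) : PySem.Dict String (PySem.Dict String Int) :=
  PySem.Dict.mk (S.map (fun n => (n, pvTriple (ta n) (va n) (xa n))))

-- A's step, on the extracted class name
def pvStepName (field : String) (d : PySem.Dict String (PySem.Dict String Int)) (n : String) : PySem.Dict String (PySem.Dict String Int) :=
  let d' := if d.contains n then d
            else d.insert n (PySem.Dict.ofList [("train", (0:Int)), ("val", 0), ("test", 0)])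
  d'.modify n PySem.Dict.empty (fun inner => inner.insert field (inner.getD field 0 + 1))

-- a loop over samples that skips name-less samples is a loop over the name stream
lemma pvFoldName {α : Type} (g : α → String → α) (l : List (List (String × String))) (init : α) :
    l.foldl (fun acc s => match pvName s with | none => acc | some n => g acc n) init
      = (pvNames l).foldl g init := by
  induction l generalizing init with
  | nil => rfl
  | cons s t ih =>
    simp only [List.foldl_cons, pvNames, List.filterMap_cons]
    cases h : pvName s <;> simp only [h, ih, pvNames, List.foldl_cons]

lemma pvFoldStepA (f : String) (l : List (List (String × String))) (d : PySem.Dict String (PySem.Dict String Int)) :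
    l.foldl (pvStepA f) d = (pvNames l).foldl (pvStepName f) d := by
  have h : (fun d s => pvStepA f d s)
      = (fun (d : PySem.Dict String (PySem.Dict String Int)) s =>
          match pvName s with | none => d | some n => pvStepName f d n) := rfl
  rw [show l.foldl (pvStepA f) d = l.foldl (fun d s => pvStepA f d s) d from rfl, h,
    pvFoldName (pvStepName f)]

lemma pvTally_eq_counter (l : List (List (String × String))) :
    pvTally l = PySem.Dict.counter (pvNames l) := by
  unfold pvTally
  have h : (fun (counts : PySem.Dict String Int) sample =>
      match (PySem.Dict.ofList sample).get? "common" with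
      | none => counts
      | some name => counts.insert name (counts.getD name 0 + 1))
    = (fun (counts : PySem.Dict String Int) s =>
        match pvName s with
        | none => counts
        | some n => counts.insert n (counts.getD n 0 + 1)) := rfl
  rw [h, pvFoldName (fun (counts : PySem.Dict String Int) n => counts.insert n (counts.getD n 0 + 1)),
    PySem.Dict.foldl_insert_getD_add_one_eq_counter]

-- contains / keys / getD on a dict whose items are `S.map (fun m => (m, f m))`
lemma pvContains_map {ν : Type} (S : List String) (f : String → ν) (n : String) :
    (PySem.Dict.mk (S.map (fun m => (m, f m)))).contains n = decide (n ∈ S) := by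
  rw [PySem.Dict.contains_mk]
  by_cases hn : n ∈ S
  · simp only [hn, decide_true]
    exact List.any_eq_true.mpr ⟨(n, f n), List.mem_map_of_mem hn, by simp⟩
  · simp only [hn, decide_false]
    refine List.any_eq_false.mpr ?_
    rintro ⟨a, b⟩ hab
    obtain ⟨m, hm, hme⟩ := List.mem_map.mp hab
    injection hme with h1 h2
    subst h1
    have hmn : m ≠ n := fun h => hn (h ▸ hm)
    simpa [beq_eq_false_iff_ne] using hmn

lemma pvKeys_nodup {ν : Type} (S : List String) (f : String → ν) (hS : S.Nodup) :
    (PySem.Dict.mk (S.map (fun m => (m, f m)))).keys.Nodup := by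
  rw [PySem.Dict.keys_mk, List.map_map]
  simpa [Function.comp_def] using hS

lemma pvGetD_map {ν : Type} (S : List String) (f : String → ν) (hS : S.Nodup) (n : String)
    (hn : n ∈ S) (d0 : ν) :
    (PySem.Dict.mk (S.map (fun m => (m, f m)))).getD n d0 = f n :=
  PySem.Dict.getD_of_mem_items _ (List.mem_map_of_mem (f := fun m => (m, f m)) hn) (pvKeys_nodup S f hS) d0

lemma pvAdd_of_mem {s : PySem.Set String} {x : String} (h : x ∈ s) : PySem.Set.add s x = s := by
  simp [PySem.Set.add, h]

lemma pvAdd_of_not_mem {s : PySem.Set String} {x : String} (h : x ∉ s) :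
    PySem.Set.add s x = s ++ [x] := by
  simp [PySem.Set.add, h]

-- `d[c][field] += 1` on the inner triple, one equation per field literal
lemma pvBump_train (a b c : Int) :
    (pvTriple a b c).insert "train" ((pvTriple a b c).getD "train" 0 + 1) = pvTriple (a + 1) b c := rfl
lemma pvBump_val (a b c : Int) :
    (pvTriple a b c).insert "val" ((pvTriple a b c).getD "val" 0 + 1) = pvTriple a (b + 1) c := rfl
lemma pvBump_test (a b c : Int) :
    (pvTriple a b c).insert "test" ((pvTriple a b c).getD "test" 0 + 1) = pvTriple a b (c + 1) := rfl

-- pvStepName with `modify` unfolded to insert/getD (definitional)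
lemma pvStepName_expand (f : String) (d : PySem.Dict String (PySem.Dict String Int)) (n : String) :
    pvStepName f d n
      = (if d.contains n then d else d.insert n (PySem.Dict.ofList [("train", (0:Int)), ("val", 0), ("test", 0)])).insert n
          (((if d.contains n then d else d.insert n (PySem.Dict.ofList [("train", (0:Int)), ("val", 0), ("test", 0)])).getD n PySem.Dict.empty).insert f
            (((if d.contains n then d else d.insert n (PySem.Dict.ofList [("train", (0:Int)), ("val", 0), ("test", 0)])).getD n PySem.Dict.empty).getD f 0 + 1)) := rfl

lemma pvStepName_train (S : List String) (ta va xa : String → Int) (hS : S.Nodup) (n : String)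
    (h0 : n ∉ S → ta n = 0 ∧ va n = 0 ∧ xa n = 0) :
    pvStepName "train" (pvCanon S ta va xa) n
      = pvCanon (PySem.Set.add S n) (fun m => if m = n then ta m + 1 else ta m) va xa := by
  rw [pvStepName_expand]
  by_cases hn : n ∈ S
  · have hc : (pvCanon S ta va xa).contains n = true := by
      unfold pvCanon; rw [pvContains_map]; simpa using hn
    rw [if_pos hc]
    have hget : (pvCanon S ta va xa).getD n PySem.Dict.empty = pvTriple (ta n) (va n) (xa n) := by
      unfold pvCanon; exact pvGetD_map S _ hS n hn _
    rw [hget, pvBump_train]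
    apply PySem.Dict.ext
    rw [PySem.Dict.items_insert_of_contains _ _ hc]
    show List.map (fun p => if p.1 == n then (n, pvTriple (ta n + 1) (va n) (xa n)) else p)
        (S.map fun m => (m, pvTriple (ta m) (va m) (xa m)))
      = List.map (fun m => (m, pvTriple (if m = n then ta m + 1 else ta m) (va m) (xa m))) (PySem.Set.add S n)
    rw [pvAdd_of_mem hn, List.map_map]
    refine List.map_congr_left fun m hm => ?_
    by_cases hmn : m = n
    · subst hmn; simp [Function.comp_def]
    · simp [Function.comp_def, hmn]
  · have hc : (pvCanon S ta va xa).contains n = false := by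
      unfold pvCanon; rw [pvContains_map]; simpa using hn
    obtain ⟨hta, hva, hxa⟩ := h0 hn
    rw [if_neg (by simp [hc])]
    have hins : (pvCanon S ta va xa).insert n (PySem.Dict.ofList [("train", (0:Int)), ("val", 0), ("test", 0)])
        = PySem.Dict.mk ((S ++ [n]).map (fun m => (m, if m = n then pvTriple 0 0 0 else pvTriple (ta m) (va m) (xa m)))) := by
      apply PySem.Dict.ext
      rw [PySem.Dict.items_insert_of_not_contains _ _ hc]
      show S.map (fun m => (m, pvTriple (ta m) (va m) (xa m))) ++ [(n, pvTriple 0 0 0)] = _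
      rw [List.map_append]
      refine congrArg₂ _ (List.map_congr_left fun m hm => ?_) ?_
      · have hmn : m ≠ n := fun h => hn (h ▸ hm)
        simp [hmn]
      · simp
    rw [hins]
    have hnd : (S ++ [n]).Nodup := by
      simp [List.nodup_append, hS]
      exact fun a ha h => hn (h ▸ ha)
    have hget : (PySem.Dict.mk ((S ++ [n]).map (fun m => (m, if m = n then pvTriple 0 0 0 else pvTriple (ta m) (va m) (xa m))))).getD n PySem.Dict.empty
        = pvTriple 0 0 0 := by
      rw [pvGetD_map _ _ hnd n (by simp)]
      simp
    rw [hget, pvBump_train]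
    apply PySem.Dict.ext
    rw [PySem.Dict.items_insert_of_contains _ _ (by rw [pvContains_map]; simp)]
    show List.map (fun p => if p.1 == n then (n, pvTriple (0 + 1) 0 0) else p)
        ((S ++ [n]).map (fun m => (m, if m = n then pvTriple 0 0 0 else pvTriple (ta m) (va m) (xa m))))
      = List.map (fun m => (m, pvTriple (if m = n then ta m + 1 else ta m) (va m) (xa m))) (PySem.Set.add S n)
    rw [pvAdd_of_not_mem hn, List.map_map, List.map_append, List.map_append]
    refine congrArg₂ _ (List.map_congr_left fun m hm => ?_) ?_
    · have hmn : m ≠ n := fun h => hn (h ▸ hm)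
      simp [Function.comp_def, hmn]
    · simp [Function.comp_def, hta, hva, hxa]

lemma pvStepName_val (S : List String) (ta va xa : String → Int) (hS : S.Nodup) (n : String)
    (h0 : n ∉ S → ta n = 0 ∧ va n = 0 ∧ xa n = 0) :
    pvStepName "val" (pvCanon S ta va xa) n
      = pvCanon (PySem.Set.add S n) ta (fun m => if m = n then va m + 1 else va m) xa := by
  rw [pvStepName_expand]
  by_cases hn : n ∈ S
  · have hc : (pvCanon S ta va xa).contains n = true := by
      unfold pvCanon; rw [pvContains_map]; simpa using hn
    rw [if_pos hc]
    have hget : (pvCanon S ta va xa).getD n PySem.Dict.empty = pvTriple (ta n) (va n) (xa n) := by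
      unfold pvCanon; exact pvGetD_map S _ hS n hn _
    rw [hget, pvBump_val]
    apply PySem.Dict.ext
    rw [PySem.Dict.items_insert_of_contains _ _ hc]
    show List.map (fun p => if p.1 == n then (n, pvTriple (ta n) (va n + 1) (xa n)) else p)
        (S.map fun m => (m, pvTriple (ta m) (va m) (xa m)))
      = List.map (fun m => (m, pvTriple (ta m) (if m = n then va m + 1 else va m) (xa m))) (PySem.Set.add S n)
    rw [pvAdd_of_mem hn, List.map_map]
    refine List.map_congr_left fun m hm => ?_
    by_cases hmn : m = n
    · subst hmn; simp [Function.comp_def]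
    · simp [Function.comp_def, hmn]
  · have hc : (pvCanon S ta va xa).contains n = false := by
      unfold pvCanon; rw [pvContains_map]; simpa using hn
    obtain ⟨hta, hva, hxa⟩ := h0 hn
    rw [if_neg (by simp [hc])]
    have hins : (pvCanon S ta va xa).insert n (PySem.Dict.ofList [("train", (0:Int)), ("val", 0), ("test", 0)])
        = PySem.Dict.mk ((S ++ [n]).map (fun m => (m, if m = n then pvTriple 0 0 0 else pvTriple (ta m) (va m) (xa m)))) := by
      apply PySem.Dict.ext
      rw [PySem.Dict.items_insert_of_not_contains _ _ hc]
      show S.map (fun m => (m, pvTriple (ta m) (va m) (xa m))) ++ [(n, pvTriple 0 0 0)] = _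
      rw [List.map_append]
      refine congrArg₂ _ (List.map_congr_left fun m hm => ?_) ?_
      · have hmn : m ≠ n := fun h => hn (h ▸ hm)
        simp [hmn]
      · simp
    rw [hins]
    have hnd : (S ++ [n]).Nodup := by
      simp [List.nodup_append, hS]
      exact fun a ha h => hn (h ▸ ha)
    have hget : (PySem.Dict.mk ((S ++ [n]).map (fun m => (m, if m = n then pvTriple 0 0 0 else pvTriple (ta m) (va m) (xa m))))).getD n PySem.Dict.empty
        = pvTriple 0 0 0 := by
      rw [pvGetD_map _ _ hnd n (by simp)]
      simp
    rw [hget, pvBump_val]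
    apply PySem.Dict.ext
    rw [PySem.Dict.items_insert_of_contains _ _ (by rw [pvContains_map]; simp)]
    show List.map (fun p => if p.1 == n then (n, pvTriple 0 (0 + 1) 0) else p)
        ((S ++ [n]).map (fun m => (m, if m = n then pvTriple 0 0 0 else pvTriple (ta m) (va m) (xa m))))
      = List.map (fun m => (m, pvTriple (ta m) (if m = n then va m + 1 else va m) (xa m))) (PySem.Set.add S n)
    rw [pvAdd_of_not_mem hn, List.map_map, List.map_append, List.map_append]
    refine congrArg₂ _ (List.map_congr_left fun m hm => ?_) ?_
    · have hmn : m ≠ n := fun h => hn (h ▸ hm)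
      simp [Function.comp_def, hmn]
    · simp [Function.comp_def, hta, hva, hxa]

lemma pvStepName_test (S : List String) (ta va xa : String → Int) (hS : S.Nodup) (n : String)
    (h0 : n ∉ S → ta n = 0 ∧ va n = 0 ∧ xa n = 0) :
    pvStepName "test" (pvCanon S ta va xa) n
      = pvCanon (PySem.Set.add S n) ta va (fun m => if m = n then xa m + 1 else xa m) := by
  rw [pvStepName_expand]
  by_cases hn : n ∈ S
  · have hc : (pvCanon S ta va xa).contains n = true := by
      unfold pvCanon; rw [pvContains_map]; simpa using hn
    rw [if_pos hc]
    have hget : (pvCanon S ta va xa).getD n PySem.Dict.empty = pvTriple (ta n) (va n) (xa n) := by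
      unfold pvCanon; exact pvGetD_map S _ hS n hn _
    rw [hget, pvBump_test]
    apply PySem.Dict.ext
    rw [PySem.Dict.items_insert_of_contains _ _ hc]
    show List.map (fun p => if p.1 == n then (n, pvTriple (ta n) (va n) (xa n + 1)) else p)
        (S.map fun m => (m, pvTriple (ta m) (va m) (xa m)))
      = List.map (fun m => (m, pvTriple (ta m) (va m) (if m = n then xa m + 1 else xa m))) (PySem.Set.add S n)
    rw [pvAdd_of_mem hn, List.map_map]
    refine List.map_congr_left fun m hm => ?_
    by_cases hmn : m = n
    · subst hmn; simp [Function.comp_def]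
    · simp [Function.comp_def, hmn]
  · have hc : (pvCanon S ta va xa).contains n = false := by
      unfold pvCanon; rw [pvContains_map]; simpa using hn
    obtain ⟨hta, hva, hxa⟩ := h0 hn
    rw [if_neg (by simp [hc])]
    have hins : (pvCanon S ta va xa).insert n (PySem.Dict.ofList [("train", (0:Int)), ("val", 0), ("test", 0)])
        = PySem.Dict.mk ((S ++ [n]).map (fun m => (m, if m = n then pvTriple 0 0 0 else pvTriple (ta m) (va m) (xa m)))) := by
      apply PySem.Dict.ext
      rw [PySem.Dict.items_insert_of_not_contains _ _ hc]
      show S.map (fun m => (m, pvTriple (ta m) (va m) (xa m))) ++ [(n, pvTriple 0 0 0)] = _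
      rw [List.map_append]
      refine congrArg₂ _ (List.map_congr_left fun m hm => ?_) ?_
      · have hmn : m ≠ n := fun h => hn (h ▸ hm)
        simp [hmn]
      · simp
    rw [hins]
    have hnd : (S ++ [n]).Nodup := by
      simp [List.nodup_append, hS]
      exact fun a ha h => hn (h ▸ ha)
    have hget : (PySem.Dict.mk ((S ++ [n]).map (fun m => (m, if m = n then pvTriple 0 0 0 else pvTriple (ta m) (va m) (xa m))))).getD n PySem.Dict.empty
        = pvTriple 0 0 0 := by
      rw [pvGetD_map _ _ hnd n (by simp)]
      simp
    rw [hget, pvBump_test]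
    apply PySem.Dict.ext
    rw [PySem.Dict.items_insert_of_contains _ _ (by rw [pvContains_map]; simp)]
    show List.map (fun p => if p.1 == n then (n, pvTriple 0 0 (0 + 1)) else p)
        ((S ++ [n]).map (fun m => (m, if m = n then pvTriple 0 0 0 else pvTriple (ta m) (va m) (xa m))))
      = List.map (fun m => (m, pvTriple (ta m) (va m) (if m = n then xa m + 1 else xa m))) (PySem.Set.add S n)
    rw [pvAdd_of_not_mem hn, List.map_map, List.map_append, List.map_append]
    refine congrArg₂ _ (List.map_congr_left fun m hm => ?_) ?_
    · have hmn : m ≠ n := fun h => hn (h ▸ hm)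
      simp [Function.comp_def, hmn]
    · simp [Function.comp_def, hta, hva, hxa]

lemma pvCanon_congr {S : List String} {ta va xa ta' va' xa' : String → Int}
    (h1 : ∀ m, ta m = ta' m) (h2 : ∀ m, va m = va' m) (h3 : ∀ m, xa m = xa' m) :
    pvCanon S ta va xa = pvCanon S ta' va' xa' := by
  unfold pvCanon
  exact congrArg _ (List.map_congr_left (fun m _ => by rw [h1, h2, h3]))

lemma pvPhase_train (N : List String) : ∀ (S : List String) (ta va xa : String → Int), S.Nodup →
    (∀ n, n ∉ S → ta n = 0 ∧ va n = 0 ∧ xa n = 0) →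
    N.foldl (pvStepName "train") (pvCanon S ta va xa)
      = pvCanon (PySem.Set.update S N) (fun m => ta m + (N.count m : Int)) va xa := by
  induction N with
  | nil =>
    intro S ta va xa hS h0
    exact (pvCanon_congr (fun m => by simp) (fun _ => rfl) (fun _ => rfl)).symm
  | cons n t ih =>
    intro S ta va xa hS h0
    rw [List.foldl_cons, pvStepName_train S ta va xa hS n (h0 n),
      ih (PySem.Set.add S n) _ va xa (PySem.Set.nodup_add S n hS)
        (fun m hm => by
          rw [PySem.Set.mem_add] at hm
          push_neg at hm
          obtain ⟨h0a, h0b, h0c⟩ := h0 m hm.1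
          exact ⟨(by simp [hm.2, h0a]), h0b, h0c⟩)]
    have hu : PySem.Set.update S (n :: t) = PySem.Set.update (PySem.Set.add S n) t := rfl
    rw [hu]
    refine pvCanon_congr (fun m => ?_) (fun _ => rfl) (fun _ => rfl)
    rw [List.count_cons]
    by_cases hmn : m = n
    · subst hmn
      rw [if_pos rfl, if_pos (by simp)]
      push_cast
      ring
    · rw [if_neg hmn, if_neg (by simpa using Ne.symm hmn)]
      push_cast
      ring

lemma pvPhase_val (N : List String) : ∀ (S : List String) (ta va xa : String → Int), S.Nodup →
    (∀ n, n ∉ S → ta n = 0 ∧ va n = 0 ∧ xa n = 0) →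
    N.foldl (pvStepName "val") (pvCanon S ta va xa)
      = pvCanon (PySem.Set.update S N) ta (fun m => va m + (N.count m : Int)) xa := by
  induction N with
  | nil =>
    intro S ta va xa hS h0
    exact (pvCanon_congr (fun _ => rfl) (fun m => by simp) (fun _ => rfl)).symm
  | cons n t ih =>
    intro S ta va xa hS h0
    rw [List.foldl_cons, pvStepName_val S ta va xa hS n (h0 n),
      ih (PySem.Set.add S n) ta _ xa (PySem.Set.nodup_add S n hS)
        (fun m hm => by
          rw [PySem.Set.mem_add] at hm
          push_neg at hm
          obtain ⟨h0a, h0b, h0c⟩ := h0 m hm.1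
          exact ⟨h0a, (by simp [hm.2, h0b]), h0c⟩)]
    have hu : PySem.Set.update S (n :: t) = PySem.Set.update (PySem.Set.add S n) t := rfl
    rw [hu]
    refine pvCanon_congr (fun _ => rfl) (fun m => ?_) (fun _ => rfl)
    rw [List.count_cons]
    by_cases hmn : m = n
    · subst hmn
      rw [if_pos rfl, if_pos (by simp)]
      push_cast
      ring
    · rw [if_neg hmn, if_neg (by simpa using Ne.symm hmn)]
      push_cast
      ring

lemma pvPhase_test (N : List String) : ∀ (S : List String) (ta va xa : String → Int), S.Nodup →
    (∀ n, n ∉ S → ta n = 0 ∧ va n = 0 ∧ xa n = 0) →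
    N.foldl (pvStepName "test") (pvCanon S ta va xa)
      = pvCanon (PySem.Set.update S N) ta va (fun m => xa m + (N.count m : Int)) := by
  induction N with
  | nil =>
    intro S ta va xa hS h0
    exact (pvCanon_congr (fun _ => rfl) (fun _ => rfl) (fun m => by simp)).symm
  | cons n t ih =>
    intro S ta va xa hS h0
    rw [List.foldl_cons, pvStepName_test S ta va xa hS n (h0 n),
      ih (PySem.Set.add S n) ta va _ (PySem.Set.nodup_add S n hS)
        (fun m hm => by
          rw [PySem.Set.mem_add] at hm
          push_neg at hm
          obtain ⟨h0a, h0b, h0c⟩ := h0 m hm.1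
          exact ⟨h0a, h0b, (by simp [hm.2, h0c])⟩)]
    have hu : PySem.Set.update S (n :: t) = PySem.Set.update (PySem.Set.add S n) t := rfl
    rw [hu]
    refine pvCanon_congr (fun _ => rfl) (fun _ => rfl) (fun m => ?_)
    rw [List.count_cons]
    by_cases hmn : m = n
    · subst hmn
      rw [if_pos rfl, if_pos (by simp)]
      push_cast
      ring
    · rw [if_neg hmn, if_neg (by simpa using Ne.symm hmn)]
      push_cast
      ring

-- B's merge loop over the concatenated key lists, in canonical form
lemma pvMerge (v : String → PySem.Dict String Int) (K : List String) : ∀ (S : List String), S.Nodup →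
    K.foldl (fun r n => if r.contains n then r else r.insert n (v n))
        (PySem.Dict.mk (S.map (fun n => (n, v n))))
      = PySem.Dict.mk ((PySem.Set.update S K).map (fun n => (n, v n))) := by
  induction K with
  | nil => intro S hS; rfl
  | cons n t ih =>
    intro S hS
    rw [List.foldl_cons]
    have hupd : PySem.Set.update S (n :: t) = PySem.Set.update (PySem.Set.add S n) t := rfl
    rw [hupd]
    by_cases hn : n ∈ S
    · rw [if_pos (by rw [pvContains_map]; simpa using hn), pvAdd_of_mem hn]
      exact ih S hS
    · rw [if_neg (by rw [pvContains_map]; simp [hn])]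
      have hins : ((PySem.Dict.mk (S.map (fun n => (n, v n)))).insert n (v n))
          = PySem.Dict.mk ((PySem.Set.add S n).map (fun n => (n, v n))) := by
        apply PySem.Dict.ext
        rw [PySem.Dict.items_insert_of_not_contains _ _ (by rw [pvContains_map]; simp [hn]),
          pvAdd_of_not_mem hn, List.map_append]
        rfl
      rw [hins]
      exact ih (PySem.Set.add S n) (PySem.Set.nodup_add S n hS)

lemma pvSet_update_ofList (s : PySem.Set String) (l : List String) :
    PySem.Set.update s (PySem.Set.ofList l) = PySem.Set.update s l := by
  induction l using List.reverseRecOn with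
  | nil => rfl
  | append_singleton t x ih =>
    have h1 : PySem.Set.update s (t ++ [x]) = PySem.Set.add (PySem.Set.update s t) x := by
      unfold PySem.Set.update
      rw [List.foldl_append]
      rfl
    rw [h1, PySem.Set.ofList_append]
    show PySem.Set.update s (PySem.Set.add (PySem.Set.ofList t) x) = _
    by_cases hx : x ∈ PySem.Set.ofList t
    · rw [pvAdd_of_mem hx, ih]
      have hxm : x ∈ PySem.Set.update s t := by
        rw [PySem.Set.mem_update]
        exact Or.inr ((PySem.Set.mem_ofList t x).mp hx)
      rw [pvAdd_of_mem hxm]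
    · rw [pvAdd_of_not_mem hx]
      have h2 : PySem.Set.update s (PySem.Set.ofList t ++ [x])
          = PySem.Set.add (PySem.Set.update s (PySem.Set.ofList t)) x := by
        unfold PySem.Set.update
        rw [List.foldl_append]
        rfl
      rw [h2, ih]

-- the `if key in dict:` loops read exactly `dict.get(key, [])`
lemma pvMatchGetD {α : Type} (d : PySem.Dict String (List (List (String × String)))) (k : String)
    (g : α → List (String × String) → α) (init : α) :
    (match d.get? k with
     | none => init
     | some samples => samples.foldl g init) = (d.getD k []).foldl g init := by
  cases h : d.get? k <;> simp [PySem.Dict.getD_eq_get?_getD, h]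

-- A in closed form
lemma pvA_eq (train_data test_data : List (String × List (List (String × String))))
    (checkpoint_round : Int) (ct cx : String) :
    calculate_round_class_distribution train_data test_data checkpoint_round ct cx
      = (PySem.Set.update (PySem.Set.update (PySem.Set.ofList (pvT train_data checkpoint_round))
            (pvV test_data ct)) (pvV test_data cx)).map
          (fun n => (n, [("train", ((pvT train_data checkpoint_round).count n : Int)),
                         ("val", ((pvV test_data ct).count n : Int)),
                         ("test", ((pvV test_data cx).count n : Int))])) := by
  simp only [calculate_round_class_distribution]
  have h1 : (fun (d : PySem.Dict String (PySem.Dict String Int)) ckp_num =>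
      match (PySem.Dict.ofList train_data).get? ("ckp_" ++ PySem.Int.toStr ckp_num) with
      | none => d
      | some samples => samples.foldl (pvStepA "train") d)
    = (fun d ckp_num =>
        ((PySem.Dict.ofList train_data).getD ("ckp_" ++ PySem.Int.toStr ckp_num) []).foldl (pvStepA "train") d) :=
    funext fun d => funext fun k => pvMatchGetD _ _ _ _
  rw [h1, ← List.foldl_flatMap, pvFoldStepA "train"]
  rw [pvMatchGetD (PySem.Dict.ofList test_data) ct, pvFoldStepA "val"]
  rw [pvMatchGetD (PySem.Dict.ofList test_data) cx, pvFoldStepA "test"]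
  rw [show pvNames ((PySem.List.pyRange 1 (checkpoint_round + 1) 1).flatMap
      (fun ckp_num => (PySem.Dict.ofList train_data).getD ("ckp_" ++ PySem.Int.toStr ckp_num) []))
      = pvT train_data checkpoint_round from rfl]
  rw [show pvNames ((PySem.Dict.ofList test_data).getD ct []) = pvV test_data ct from rfl]
  rw [show pvNames ((PySem.Dict.ofList test_data).getD cx []) = pvV test_data cx from rfl]
  have hc0 : (PySem.Dict.empty : PySem.Dict String (PySem.Dict String Int))
      = pvCanon [] (fun _ => 0) (fun _ => 0) (fun _ => 0) := rfl
  rw [hc0, pvPhase_train _ [] _ _ _ List.nodup_nil (fun _ _ => ⟨rfl, rfl, rfl⟩)]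
  have hT : PySem.Set.update ([] : List String) (pvT train_data checkpoint_round)
      = PySem.Set.ofList (pvT train_data checkpoint_round) := rfl
  rw [hT]
  rw [pvPhase_val _ _ _ _ _ (PySem.Set.nodup_ofList _)
    (fun m hm => by
      rw [PySem.Set.mem_ofList] at hm
      exact ⟨by simp [List.count_eq_zero.mpr hm], rfl, rfl⟩)]
  rw [pvPhase_test _ _ _ _ _ (PySem.Set.nodup_update _ _ (PySem.Set.nodup_ofList _))
    (fun m hm => by
      rw [PySem.Set.mem_update, PySem.Set.mem_ofList] at hm
      push_neg at hm
      exact ⟨by simp [List.count_eq_zero.mpr hm.1], by simp [List.count_eq_zero.mpr hm.2], rfl⟩)]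
  show ((PySem.Set.update (PySem.Set.update (PySem.Set.ofList (pvT train_data checkpoint_round))
      (pvV test_data ct)) (pvV test_data cx)).map _).map _ = _
  rw [List.map_map]
  refine List.map_congr_left (fun m _ => ?_)
  simp [Function.comp_def, pvTriple]

-- B in the same closed form
lemma pvB_eq (train_data test_data : List (String × List (List (String × String))))
    (checkpoint_round : Int) (ct cx : String) :
    calculate_round_class_distribution_alt train_data test_data checkpoint_round ct cx
      = (PySem.Set.update (PySem.Set.update (PySem.Set.ofList (pvT train_data checkpoint_round))
            (pvV test_data ct)) (pvV test_data cx)).map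
          (fun n => (n, [("train", ((pvT train_data checkpoint_round).count n : Int)),
                         ("val", ((pvV test_data ct).count n : Int)),
                         ("test", ((pvV test_data cx).count n : Int))])) := by
  simp only [calculate_round_class_distribution_alt]
  rw [PySem.List.foldl_append_eq_flatMap, List.nil_append,
    pvTally_eq_counter, pvTally_eq_counter, pvTally_eq_counter]
  rw [show pvNames ((PySem.List.pyRange 1 (checkpoint_round + 1) 1).flatMap
      (fun ckp_num => (PySem.Dict.ofList train_data).getD ("ckp_" ++ PySem.Int.toStr ckp_num) []))
      = pvT train_data checkpoint_round from rfl]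
  rw [show pvNames ((PySem.Dict.ofList test_data).getD ct []) = pvV test_data ct from rfl]
  rw [show pvNames ((PySem.Dict.ofList test_data).getD cx []) = pvV test_data cx from rfl]
  have hv : (fun (r : PySem.Dict String (PySem.Dict String Int)) name =>
      if r.contains name then r
      else r.insert name (PySem.Dict.ofList
        [("train", (PySem.Dict.counter (pvT train_data checkpoint_round)).getD name 0),
         ("val", (PySem.Dict.counter (pvV test_data ct)).getD name 0),
         ("test", (PySem.Dict.counter (pvV test_data cx)).getD name 0)]))
    = (fun r name => if r.contains name then r
        else r.insert name (pvTriple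
          ((PySem.Dict.counter (pvT train_data checkpoint_round)).getD name 0)
          ((PySem.Dict.counter (pvV test_data ct)).getD name 0)
          ((PySem.Dict.counter (pvV test_data cx)).getD name 0))) := rfl
  rw [hv]
  have hempty : (PySem.Dict.empty : PySem.Dict String (PySem.Dict String Int))
      = PySem.Dict.mk (([] : List String).map (fun n => (n, pvTriple
          ((PySem.Dict.counter (pvT train_data checkpoint_round)).getD n 0)
          ((PySem.Dict.counter (pvV test_data ct)).getD n 0)
          ((PySem.Dict.counter (pvV test_data cx)).getD n 0)))) := rfl
  rw [hempty, pvMerge _ _ [] List.nodup_nil]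
  have h2 : ∀ (s : PySem.Set String) (a b : List String),
      PySem.Set.update s (a ++ b) = PySem.Set.update (PySem.Set.update s a) b := by
    intro s a b
    unfold PySem.Set.update
    rw [List.foldl_append]
  have hkeys : PySem.Set.update ([] : List String)
      (((PySem.Dict.counter (pvT train_data checkpoint_round)).keys
        ++ (PySem.Dict.counter (pvV test_data ct)).keys)
        ++ (PySem.Dict.counter (pvV test_data cx)).keys)
      = PySem.Set.update (PySem.Set.update (PySem.Set.ofList (pvT train_data checkpoint_round))
          (pvV test_data ct)) (pvV test_data cx) := by
    rw [PySem.Dict.keys_counter, PySem.Dict.keys_counter, PySem.Dict.keys_counter, h2, h2,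
      pvSet_update_ofList, pvSet_update_ofList, pvSet_update_ofList]
    rfl
  rw [hkeys]
  show ((PySem.Set.update (PySem.Set.update (PySem.Set.ofList (pvT train_data checkpoint_round))
      (pvV test_data ct)) (pvV test_data cx)).map _).map _ = _
  rw [List.map_map]
  refine List.map_congr_left (fun m _ => ?_)
  simp [Function.comp_def, pvTriple, PySem.Dict.getD_counter]

-- ===== VERDICT (by name: the statement is the Claim_ definition above) =====
theorem calculate_round_class_distribution_spec : Claim_equal_calculate_round_class_distribution := by
  intro train_data test_data checkpoint_round ct cx _ _
  unfold Spec_calculate_round_class_distribution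
  rw [pvA_eq, pvB_eq]
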